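-- pv_equiv track=rewrite | github.com/posl/comment_recommendation | script/split_gen/5_time/zh/240_C/4.py | jumpable
-- ===== SOURCE A (Python) =====
-- def jumpable(n, x, a, b):
--     if x == 0:
--         return True
--     if n == 0:
--         return False
--     if jumpable(n-1, x-a[n-1], a, b) or jumpable(n-1, x-b[n-1], a, b):
--         return True
--     return False
-- ===== SOURCE B (Python) =====
-- def jumpable(n, x, a, b):
--     reach = {0}
--     for i in range(n - 1, -1, -1):
--         if x in reach:
--             return True
--         reach = {s + a[i] for s in reach} | {s + b[i] for s in reach}
--     return x in reach
-- ===== Notes on version B (the rewrite author's own statement) =====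
-- stated objective: alternative
-- what changed: Replaces A's memo-less branching recursion (two recursive calls per index) with an iterative DP that maintains the set of reachable partial sums in one pass over the indices.
-- outside the precondition, e.g. on jumpable(-1, 3, [1, 2, 3, 4], [1, 2, 3, 4]): A returns True, B returns False; on jumpable(-1, 3, [], []): A raises IndexError, B returns False; on jumpable(2, 9, [7], [7]): A raises IndexError, B raises IndexError
import Mathlib
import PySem

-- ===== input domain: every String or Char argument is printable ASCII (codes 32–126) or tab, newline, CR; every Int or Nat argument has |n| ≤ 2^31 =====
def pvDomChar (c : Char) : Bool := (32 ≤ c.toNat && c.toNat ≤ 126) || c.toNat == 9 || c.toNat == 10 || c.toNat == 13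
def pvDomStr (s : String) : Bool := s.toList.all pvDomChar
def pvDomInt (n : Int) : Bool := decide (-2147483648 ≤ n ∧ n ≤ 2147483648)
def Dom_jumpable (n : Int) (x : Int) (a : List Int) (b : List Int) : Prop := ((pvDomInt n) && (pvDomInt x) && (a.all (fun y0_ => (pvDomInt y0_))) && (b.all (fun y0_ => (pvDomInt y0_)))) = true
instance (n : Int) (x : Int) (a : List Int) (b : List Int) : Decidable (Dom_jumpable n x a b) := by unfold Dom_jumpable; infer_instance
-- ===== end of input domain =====

-- B replaces A's memo-less exponential recursion with an iterative DP over the set of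
-- reachable partial sums (one pass over the indices, sums deduplicated in a set).


-- ===== PORT A =====
-- literal transliteration of A; the 'n < 0' branch is a totality guard only:
-- there Python recurses forever (or hits an IndexError), which Pre_ excludes.
def jumpable (n : Int) (x : Int) (a : List Int) (b : List Int) : Bool :=
  if x = 0 then true
  else if n = 0 then false
  else if n < 0 then false
  else
    match PySem.List.pyGet? a (n-1), PySem.List.pyGet? b (n-1) with
    | some av, some bv =>
        jumpable (n-1) (x-av) a b || jumpable (n-1) (x-bv) a b
    | _, _ => false   -- IndexError in Python; excluded by Pre_
termination_by n.toNat
decreasing_by all_goals omega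

-- ===== PORT B =====
-- the loop body of Source B: early return on x ∈ reach, else rebuild the reach set
def reachGo (x : Int) (a b : List Int) : List Int → PySem.Set Int → Bool
  | [], reach => PySem.Set.contains reach x
  | i :: rest, reach =>
    if PySem.Set.contains reach x then true
    else
      match PySem.List.pyGet? a i with
      | none => false   -- IndexError in Python; excluded by Pre_
      | some av =>
        match PySem.List.pyGet? b i with
        | none => false   -- IndexError in Python; excluded by Pre_
        | some bv =>
          reachGo x a b rest
            (PySem.Set.union (PySem.Set.ofList (reach.map (· + av))) (reach.map (· + bv)))

def jumpable_alt (n : Int) (x : Int) (a : List Int) (b : List Int) : Bool :=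
  reachGo x a b (PySem.List.pyRange (n-1) (-1) (-1)) (PySem.Set.ofList [0])

-- ===== PRECONDITION & SPEC =====
-- Pre_ excludes (except when x = 0, where both return True at once) the invalid counts n:
-- negative n, on which A descends through ever-larger negative indices until an IndexError or, via
-- negative-index wraparound, accidentally returns True where B's loop runs zero times, and n exceeding a
-- list length, on which A raises IndexError.
def Pre_jumpable (n : Int) (x : Int) (a : List Int) (b : List Int) : Prop :=
  (0 ≤ n ∧ n ≤ (a.length : Int) ∧ n ≤ (b.length : Int)) ∨ x = 0
instance (n : Int) (x : Int) (a : List Int) (b : List Int) : Decidable (Pre_jumpable n x a b) := by unfold Pre_jumpable; infer_instance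
def pvWitness_jumpable : Int × Int × List Int × List Int := (2, 3, [1, 2], [3, 4])

def Spec_jumpable (n : Int) (x : Int) (a : List Int) (b : List Int) (out : Bool) : Prop := out = jumpable_alt n x a b
instance (n : Int) (x : Int) (a : List Int) (b : List Int) (out : Bool) : Decidable (Spec_jumpable n x a b out) := by unfold Spec_jumpable; infer_instance

-- ===== CLAIM (what is proved, stated in full; the proofs are below) =====
def Claim_equal_jumpable : Prop := ∀ (n : Int) (x : Int) (a : List Int) (b : List Int), Dom_jumpable n x a b → Pre_jumpable n x a b → Spec_jumpable n x a b (jumpable n x a b)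

-- ===== LEMMAS AND PROOFS =====

lemma go_iff (a b : List Int) (x : Int) (k : Nat)
    (ha : k ≤ a.length) (hb : k ≤ b.length) (R : PySem.Set Int) :
    reachGo x a b (PySem.List.pyRange ((k : Int) - 1) (-1) (-1)) R = true ↔
      ∃ r ∈ R, jumpable (k : Int) (x - r) a b = true := by
  induction k generalizing R with
  | zero =>
      rw [PySem.List.pyRange_neg_one_eq_nil (by omega)]
      simp only [reachGo, PySem.Set.contains_iff]
      constructor
      · intro h; exact ⟨x, h, by simp [jumpable]⟩
      · rintro ⟨r, hr, h⟩
        unfold jumpable at h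
        by_cases hx : x - r = 0
        · have : x = r := by omega
          subst this; exact hr
        · simp [hx] at h
  | succ m ih =>
      have hstep : ((m : Int) + 1) - 1 = (m : Int) := by ring
      rw [show (((m + 1 : Nat) : Int) - 1) = (m : Int) by push_cast; ring,
          PySem.List.pyRange_neg_one_cons (by omega)]
      have hga : PySem.List.pyGet? a (m : Int) = some (a.getD m 0) := by
        rw [PySem.List.pyGet?_natCast, List.getElem?_eq_getElem (by omega)]
        simp [List.getD, List.getElem?_eq_getElem (show m < a.length by omega)]
      have hgb : PySem.List.pyGet? b (m : Int) = some (b.getD m 0) := by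
        rw [PySem.List.pyGet?_natCast, List.getElem?_eq_getElem (by omega)]
        simp [List.getD, List.getElem?_eq_getElem (show m < b.length by omega)]
      set av := a.getD m 0
      set bv := b.getD m 0
      have hjump : ∀ y : Int, jumpable ((m : Int) + 1) y a b =
          (if y = 0 then true
           else jumpable (m : Int) (y - av) a b || jumpable (m : Int) (y - bv) a b) := by
        intro y
        rw [jumpable]
        have h1 : ¬ ((m : Int) + 1 = 0) := by omega
        have h2 : ¬ ((m : Int) + 1 < 0) := by omega
        simp only [h1, h2, if_false, hstep, hga, hgb]
      simp only [reachGo]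
      by_cases hx : PySem.Set.contains R x = true
      · simp only [hx, if_true, true_iff]
        refine ⟨x, (PySem.Set.contains_iff R x).mp hx, ?_⟩
        push_cast
        rw [hjump]; simp
      · simp only [hx, Bool.false_eq_true, if_false, hga, hgb]
        rw [ih (by omega) (by omega)]
        have hxR : x ∉ R := fun h => hx ((PySem.Set.contains_iff R x).mpr h)
        constructor
        · rintro ⟨r', hr', h⟩
          have : r' ∈ PySem.Set.ofList (R.map (· + av)) ∨ r' ∈ (R.map (· + bv)) :=
            (PySem.Set.mem_union _ _ _).mp hr'
          rcases this with h1 | h1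
          · rw [PySem.Set.mem_ofList] at h1
            obtain ⟨r, hr, rfl⟩ := List.mem_map.mp h1
            refine ⟨r, hr, ?_⟩
            push_cast
            rw [hjump]
            rcases eq_or_ne (x - r) 0 with h0 | h0
            · simp [h0]
            · simp only [h0, if_false]
              have : x - (r + av) = x - r - av := by ring
              rw [this] at h
              simp [h]
          · obtain ⟨r, hr, rfl⟩ := List.mem_map.mp h1
            refine ⟨r, hr, ?_⟩
            push_cast
            rw [hjump]
            rcases eq_or_ne (x - r) 0 with h0 | h0
            · simp [h0]
            · simp only [h0, if_false]
              have : x - (r + bv) = x - r - bv := by ring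
              rw [this] at h
              simp [h]
        · rintro ⟨r, hr, h⟩
          push_cast at h
          rw [hjump] at h
          have h0 : ¬ (x - r = 0) := by
            intro h0
            have hxr : x = r := by omega
            exact hxR (hxr ▸ hr)
          simp only [h0, if_false, Bool.or_eq_true] at h
          rcases h with h | h
          · refine ⟨r + av, ?_, ?_⟩
            · exact (PySem.Set.mem_union _ _ _).mpr (Or.inl
                ((PySem.Set.mem_ofList _ _).mpr (List.mem_map.mpr ⟨r, hr, rfl⟩)))
            · have : x - (r + av) = x - r - av := by ring
              rw [this]; exact h
          · refine ⟨r + bv, ?_, ?_⟩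
            · exact (PySem.Set.mem_union _ _ _).mpr (Or.inr (List.mem_map.mpr ⟨r, hr, rfl⟩))
            · have : x - (r + bv) = x - r - bv := by ring
              rw [this]; exact h

-- ===== VERDICT (by name: the statement is the Claim_ definition above) =====
theorem jumpable_spec : Claim_equal_jumpable := by
  intro n x a b _ hpre
  rcases hpre with hpre | hx0
  case inr =>
    subst hx0
    unfold Spec_jumpable jumpable_alt
    have hgo : ∀ l : List Int, reachGo 0 a b l (PySem.Set.ofList [0]) = true := by
      intro l
      cases l with
      | nil =>
          show PySem.Set.contains (PySem.Set.ofList [0]) 0 = true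
          decide
      | cons i rest =>
          simp only [reachGo]
          rw [if_pos (by decide)]
    rw [hgo, jumpable]
    simp
  obtain ⟨hn, hna, hnb⟩ := hpre
  unfold Spec_jumpable jumpable_alt
  have hk : n = ((n.toNat : Nat) : Int) := by omega
  have h := go_iff a b x n.toNat (by omega) (by omega) (PySem.Set.ofList [0])
  rw [← hk] at h
  have hone : PySem.Set.ofList [0] = ([0] : List Int) := by decide
  rw [hone] at h
  simp only [List.mem_singleton] at h
  have h' : reachGo x a b (PySem.List.pyRange (n - 1) (-1) (-1)) [0] = true ↔
      jumpable n x a b = true := by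
    rw [h]
    constructor
    · rintro ⟨r, rfl, hr⟩; simpa using hr
    · intro hj; exact ⟨0, rfl, by simpa using hj⟩
  rw [hone]
  cases hA : jumpable n x a b
  · cases hB : reachGo x a b (PySem.List.pyRange (n - 1) (-1) (-1)) [0]
    · rfl
    · exact absurd (h'.mp hB) (by simp [hA])
  · exact (h'.mpr hA).symm
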